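-- pv_equiv track=rewrite | github.com/tulsluper/sanscript | apps/fc/scripts/defs_parsers.py | p_sfp
-- ===== SOURCE A (Python) =====
-- def p_sfp(switch, lines):
--     records = []
--     record = {}
--     for line in lines:
--         if line[:4] in ['Slot', 'Port']:
--             if record and len(record) > 2:
--                 records.append(record)
--             uPort = line.strip()
--             for x in ['Slot', 'Port', ' ', ':']:
--                 uPort = uPort.replace(x, '')
--             record = {'Switch': switch, 'uPort': uPort}
--         elif ':' in line and line[:5] != 'port ':
--             items = line.split(':', 1)
--             key, values = items
--             for word in ['(', ')', '.5', '/']: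
--                 key = key.replace(word, '')
--             key = key.strip().replace(' ', '_').replace('-', '_')
--             if key in ['Temperature', 'Current', 'Voltage']:
--                 splvalues = values.split()
--                 if len(splvalues) > 2:
--                     record[key] = splvalues[0]
--                 else:
--                     record[key] = values.strip()
--             elif key in ['RX_Power', 'TX_Power']:
--                 splvalues = values.split()
--                 if len(splvalues) > 2:
--                     record[key] = splvalues[0]
--                 else:
--                     record[key] = values.strip()
--             else:
--                 record[key] = ' '.join(values.split())
--     if record and len(record) > 2:
--         records.append(record)
--     return records
-- ===== SOURCE B (Python) =====
-- def _clean_uport(head):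
--     uPort = head.strip()
--     for x in ('Slot', 'Port', ' ', ':'):
--         uPort = uPort.replace(x, '')
--     return uPort
--
--
-- def _parse_kv(record, line):
--     if ':' in line and line[:5] != 'port ':
--         key, values = line.split(':', 1)
--         for word in ('(', ')', '.5', '/'):
--             key = key.replace(word, '')
--         key = key.strip().replace(' ', '_').replace('-', '_')
--         splvalues = values.split()
--         if key in ('Temperature', 'Current', 'Voltage', 'RX_Power', 'TX_Power'):
--             record[key] = splvalues[0] if len(splvalues) > 2 else values.strip()
--         else:
--             record[key] = ' '.join(splvalues)
--     return record
--
--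
-- def _fold(record, body):
--     for line in body:
--         record = _parse_kv(record, line)
--     return record
--
--
-- def p_sfp(switch, lines):
--     # split into consecutive blocks, a new block at every 'Slot'/'Port' header line
--     blocks = [[]]
--     for line in lines:
--         if line[:4] in ('Slot', 'Port'):
--             blocks.append([line])
--         else:
--             blocks[-1].append(line)
--     records = [_fold({}, blocks[0])]
--     records += [_fold({'Switch': switch, 'uPort': _clean_uport(b[0])}, b[1:])
--                 for b in blocks[1:]]
--     return [r for r in records if len(r) > 2]
-- ===== Notes on version B (the rewrite author's own statement) =====
-- stated objective: alternative
-- what changed: A's single stateful scan with a mutable current record and in-loop flushing is re-decomposed into three phases: split the lines into header-started blocks, map each block independently to a record (with the two identical Temperature/Current/Voltage and RX_Power/TX_Power branches merged into one), then filter the records with more than two keys.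
import Mathlib
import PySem

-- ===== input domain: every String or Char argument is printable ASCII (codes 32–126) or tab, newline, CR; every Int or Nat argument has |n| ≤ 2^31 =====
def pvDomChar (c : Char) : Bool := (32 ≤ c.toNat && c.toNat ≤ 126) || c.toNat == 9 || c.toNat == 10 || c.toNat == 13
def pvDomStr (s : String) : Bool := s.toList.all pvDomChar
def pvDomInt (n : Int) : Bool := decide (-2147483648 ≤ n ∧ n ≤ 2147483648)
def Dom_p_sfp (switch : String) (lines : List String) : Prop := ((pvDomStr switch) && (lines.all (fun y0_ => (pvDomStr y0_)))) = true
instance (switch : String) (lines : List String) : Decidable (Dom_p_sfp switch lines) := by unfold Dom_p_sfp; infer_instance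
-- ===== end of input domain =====

-- B re-decomposes A's single stateful scan as: split the lines into header-started blocks,
-- map each block to a record, filter the records with more than two keys (same values, same order).

-- shared small helpers: this cleaning code is textually identical in both Pythons
def pvCleanUPort (head : String) : String :=
  ["Slot", "Port", " ", ":"].foldl (fun s x => PySem.Str.replace s x "") (PySem.Str.strip head)

def pvCleanKey (key0 : String) : String :=
  PySem.Str.replace (PySem.Str.replace
    (PySem.Str.strip (["(", ")", ".5", "/"].foldl (fun s w => PySem.Str.replace s w "") key0))
    " " "_") "-" "_"

-- ===== PORT A =====
-- the body of A's `for line in lines` loop, on state (records, record)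
def pvStepA (switch : String)
    (st : List (PySem.Dict String String) × PySem.Dict String String) (line : String) :
    List (PySem.Dict String String) × PySem.Dict String String :=
  if PySem.Str.slice line none (some 4) ∈ (["Slot", "Port"] : List String) then
    let records := if st.2.items ≠ [] ∧ 2 < st.2.size then st.1 ++ [st.2] else st.1
    (records, (PySem.Dict.empty.insert "Switch" switch).insert "uPort" (pvCleanUPort line))
  else if PySem.Str.isIn ":" line ∧ PySem.Str.slice line none (some 5) ≠ "port " then
    match PySem.Str.splitMax? line ":" 1 with
    | some [key0, values] =>
      let key := pvCleanKey key0
      let record :=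
        if key ∈ (["Temperature", "Current", "Voltage"] : List String) then
          let splvalues := PySem.Str.split₀ values
          if 2 < splvalues.length then
            st.2.insert key ((PySem.List.pyGet? splvalues 0).getD "")  -- index 0 exists: length > 2
          else
            st.2.insert key (PySem.Str.strip values)
        else if key ∈ (["RX_Power", "TX_Power"] : List String) then
          let splvalues := PySem.Str.split₀ values
          if 2 < splvalues.length then
            st.2.insert key ((PySem.List.pyGet? splvalues 0).getD "")
          else
            st.2.insert key (PySem.Str.strip values)
        else
          st.2.insert key (PySem.Str.join " " (PySem.Str.split₀ values))
      (st.1, record)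
    | _ => st  -- unreachable: ':' occurs in line, so split(':', 1) yields exactly two pieces
  else st

def p_sfp (switch : String) (lines : List String) : List (List (String × String)) :=
  let fin := lines.foldl (pvStepA switch) ([], PySem.Dict.empty)
  (if fin.2.items ≠ [] ∧ 2 < fin.2.size then fin.1 ++ [fin.2] else fin.1).map PySem.Dict.items

-- ===== PORT B =====
def pvParseKV (record : PySem.Dict String String) (line : String) : PySem.Dict String String :=
  if PySem.Str.isIn ":" line ∧ PySem.Str.slice line none (some 5) ≠ "port " then
    match PySem.Str.splitMax? line ":" 1 with
    | some [key0, values] =>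
      let key := pvCleanKey key0
      let splvalues := PySem.Str.split₀ values
      if key ∈ (["Temperature", "Current", "Voltage", "RX_Power", "TX_Power"] : List String) then
        record.insert key
          (if 2 < splvalues.length then (PySem.List.pyGet? splvalues 0).getD ""  -- index 0 exists: length > 2
           else PySem.Str.strip values)
      else
        record.insert key (PySem.Str.join " " splvalues)
    | _ => record  -- unreachable: ':' occurs in line, so split(':', 1) yields exactly two pieces
  else record

def pvBlocks (lines : List String) : List (List String) :=
  let st := lines.foldl
    (fun (acc : List (List String) × List String) line =>
      if PySem.Str.slice line none (some 4) ∈ (["Slot", "Port"] : List String) then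
        (acc.1 ++ [acc.2], [line])
      else (acc.1, acc.2 ++ [line]))
    ([], [])
  st.1 ++ [st.2]

def pvBlockRecord (switch : String) (b : List String) : PySem.Dict String String :=
  (b.drop 1).foldl pvParseKV
    ((PySem.Dict.empty.insert "Switch" switch).insert "uPort" (pvCleanUPort (b.headD "")))

def p_sfp_alt (switch : String) (lines : List String) : List (List (String × String)) :=
  let bs := pvBlocks lines
  let records :=
    (bs.headD []).foldl pvParseKV PySem.Dict.empty :: (bs.drop 1).map (pvBlockRecord switch)
  (records.filter (fun r => 2 < r.size)).map PySem.Dict.items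

-- ===== PRECONDITION & SPEC =====
def Spec_p_sfp (switch : String) (lines : List String) (out : List (List (String × String))) : Prop := out = p_sfp_alt switch lines
instance (switch : String) (lines : List String) (out : List (List (String × String))) : Decidable (Spec_p_sfp switch lines out) := by unfold Spec_p_sfp; infer_instance

-- ===== CLAIM (what is proved, stated in full; the proofs are below) =====
def Claim_equal_p_sfp : Prop := ∀ (switch : String) (lines : List String), Dom_p_sfp switch lines → Spec_p_sfp switch lines (p_sfp switch lines)

-- ===== LEMMAS AND PROOFS =====

-- reference processing: one pass over the remaining lines with the current record
def pvProcess (switch : String) (r : PySem.Dict String String) :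
    List String → List (PySem.Dict String String)
  | [] => if 2 < r.size then [r] else []
  | l :: ls =>
      if PySem.Str.slice l none (some 4) ∈ (["Slot", "Port"] : List String) then
        (if 2 < r.size then [r] else []) ++
          pvProcess switch ((PySem.Dict.empty.insert "Switch" switch).insert "uPort" (pvCleanUPort l)) ls
      else pvProcess switch (pvParseKV r l) ls

theorem pvCond_iff (r : PySem.Dict String String) :
    (r.items ≠ [] ∧ 2 < r.size) ↔ 2 < r.size := by
  constructor
  · exact fun h => h.2
  · intro h
    refine ⟨?_, h⟩
    intro he
    simp [PySem.Dict.size, he] at h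

theorem pvStepA_kv (switch : String)
    (st : List (PySem.Dict String String) × PySem.Dict String String) (line : String)
    (h : ¬ PySem.Str.slice line none (some 4) ∈ (["Slot", "Port"] : List String)) :
    pvStepA switch st line = (st.1, pvParseKV st.2 line) := by
  unfold pvStepA pvParseKV
  rw [if_neg h]
  by_cases hc : PySem.Str.isIn ":" line ∧ PySem.Str.slice line none (some 5) ≠ "port "
  · rw [if_pos hc, if_pos hc]
    cases hs : PySem.Str.splitMax? line ":" 1 with
    | none => rfl
    | some l =>
      match l with
      | [] => rfl
      | [_] => rfl
      | _ :: _ :: _ :: _ => rfl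
      | [key0, values] =>
        dsimp only
        generalize pvCleanKey key0 = key
        generalize PySem.Str.split₀ values = splv
        generalize PySem.Str.strip values = sv
        generalize (PySem.List.pyGet? splv 0).getD "" = v0
        generalize PySem.Str.join " " splv = jv
        generalize st.2 = d
        rw [apply_ite (d.insert key)]
        by_cases h3 : key ∈ (["Temperature", "Current", "Voltage"] : List String)
        · have h5 : key ∈ (["Temperature", "Current", "Voltage", "RX_Power", "TX_Power"] : List String) := by
            clear h hc hs; simp only [List.mem_cons] at h3 ⊢; tauto
          rw [if_pos h3, if_pos h5]
        · by_cases h2 : key ∈ (["RX_Power", "TX_Power"] : List String)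
          · have h5 : key ∈ (["Temperature", "Current", "Voltage", "RX_Power", "TX_Power"] : List String) := by
              clear h hc hs; simp only [List.mem_cons] at h2 ⊢; tauto
            rw [if_neg h3, if_pos h2, if_pos h5]
          · have h5 : ¬ key ∈ (["Temperature", "Current", "Voltage", "RX_Power", "TX_Power"] : List String) := by
              clear h hc hs; simp only [List.mem_cons] at h3 h2 ⊢; tauto
            rw [if_neg h3, if_neg h2, if_neg h5]
  · rw [if_neg hc, if_neg hc]

-- A's scan, from any state, produces the already-collected records followed by pvProcess
theorem pvA_main (switch : String) : ∀ (lines : List String)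
    (rs : List (PySem.Dict String String)) (r : PySem.Dict String String),
    (let fin := lines.foldl (pvStepA switch) (rs, r)
     if fin.2.items ≠ [] ∧ 2 < fin.2.size then fin.1 ++ [fin.2] else fin.1) =
    rs ++ pvProcess switch r lines := by
  intro lines
  induction lines with
  | nil =>
      intro rs r
      simp only [List.foldl_nil, pvProcess]
      by_cases h : 2 < r.size
      · rw [if_pos ((pvCond_iff r).mpr h), if_pos h]
      · rw [if_neg (fun hc => h ((pvCond_iff r).mp hc)), if_neg h]
        simp
  | cons l ls ih =>
      intro rs r
      simp only [List.foldl_cons]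
      by_cases hl : PySem.Str.slice l none (some 4) ∈ (["Slot", "Port"] : List String)
      · have hst : pvStepA switch (rs, r) l =
            ((if r.items ≠ [] ∧ 2 < r.size then rs ++ [r] else rs),
              (PySem.Dict.empty.insert "Switch" switch).insert "uPort" (pvCleanUPort l)) := by
          unfold pvStepA
          rw [if_pos hl]
        rw [hst, ih]
        simp only [pvProcess, if_pos hl]
        by_cases h : 2 < r.size
        · rw [if_pos ((pvCond_iff r).mpr h), if_pos h]
          simp
        · rw [if_neg (fun hc => h ((pvCond_iff r).mp hc)), if_neg h]
          simp
      · rw [pvStepA_kv switch (rs, r) l hl, ih]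
        simp only [pvProcess, if_neg hl]

-- B's block splitter: step function and recursion equations
def pvStepB (acc : List (List String) × List String) (line : String) :
    List (List String) × List String :=
  if PySem.Str.slice line none (some 4) ∈ (["Slot", "Port"] : List String) then
    (acc.1 ++ [acc.2], [line])
  else (acc.1, acc.2 ++ [line])

theorem pvFoldB_fin : ∀ (lines : List String) (fin : List (List String)) (cur : List String),
    lines.foldl pvStepB (fin, cur) =
      (fin ++ (lines.foldl pvStepB ([], cur)).1, (lines.foldl pvStepB ([], cur)).2) := by
  intro lines
  induction lines with
  | nil => intro fin cur; simp
  | cons l ls ih =>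
      intro fin cur
      simp only [List.foldl_cons, pvStepB]
      by_cases hl : PySem.Str.slice l none (some 4) ∈ (["Slot", "Port"] : List String)
      · rw [if_pos hl, if_pos hl]
        simp only [List.nil_append]
        rw [ih (fin ++ [cur]) [l], ih [cur] [l]]
        simp
      · rw [if_neg hl, if_neg hl]
        exact ih fin (cur ++ [l])

def pvBlk (cur : List String) (lines : List String) : List (List String) :=
  (lines.foldl pvStepB ([], cur)).1 ++ [(lines.foldl pvStepB ([], cur)).2]

theorem pvBlk_nil (cur : List String) : pvBlk cur [] = [cur] := rfl

theorem pvBlk_cons_header (cur : List String) (l : String) (ls : List String)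
    (hl : PySem.Str.slice l none (some 4) ∈ (["Slot", "Port"] : List String)) :
    pvBlk cur (l :: ls) = cur :: pvBlk [l] ls := by
  unfold pvBlk
  simp only [List.foldl_cons, pvStepB, if_pos hl, List.nil_append]
  rw [pvFoldB_fin ls [cur] [l]]
  simp

theorem pvBlk_cons_kv (cur : List String) (l : String) (ls : List String)
    (hl : ¬ PySem.Str.slice l none (some 4) ∈ (["Slot", "Port"] : List String)) :
    pvBlk cur (l :: ls) = pvBlk (cur ++ [l]) ls := by
  unfold pvBlk
  simp only [List.foldl_cons, pvStepB, if_neg hl]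

theorem pvBlk_shift : ∀ (lines : List String) (cur : List String),
    pvBlk cur lines = (cur ++ (pvBlk [] lines).headD []) :: (pvBlk [] lines).tail := by
  intro lines
  induction lines with
  | nil => intro cur; simp [pvBlk_nil]
  | cons l ls ih =>
      intro cur
      by_cases hl : PySem.Str.slice l none (some 4) ∈ (["Slot", "Port"] : List String)
      · rw [pvBlk_cons_header cur l ls hl, pvBlk_cons_header [] l ls hl]
        simp
      · rw [pvBlk_cons_kv cur l ls hl, pvBlk_cons_kv [] l ls hl, ih (cur ++ [l]), ih ([] ++ [l])]
        simp

-- B's record pipeline from the blocks of the remaining lines, with the first block's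
-- record folded onto an arbitrary starting record r
def pvBc (switch : String) (r : PySem.Dict String String) (lines : List String) :
    List (PySem.Dict String String) :=
  (((pvBlk [] lines).headD []).foldl pvParseKV r ::
    ((pvBlk [] lines).drop 1).map (pvBlockRecord switch)).filter (fun d => 2 < d.size)

theorem pvB_main (switch : String) : ∀ (lines : List String) (r : PySem.Dict String String),
    pvBc switch r lines = pvProcess switch r lines := by
  intro lines
  induction lines with
  | nil =>
      intro r
      simp only [pvBc, pvBlk_nil, pvProcess]
      by_cases h : 2 < r.size
      · simp [List.filter, h]
      · simp [List.filter, h]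
  | cons l ls ih =>
      intro r
      have hshift := pvBlk_shift ls
      by_cases hl : PySem.Str.slice l none (some 4) ∈ (["Slot", "Port"] : List String)
      · have hblk : pvBlk [] (l :: ls) = [] :: ([l] ++ (pvBlk [] ls).headD []) :: (pvBlk [] ls).tail := by
          rw [pvBlk_cons_header [] l ls hl, hshift [l]]
        simp only [pvBc, hblk, List.headD_cons, List.drop_one, List.tail_cons, List.map_cons,
          List.foldl_nil, pvProcess, if_pos hl]
        have hrec : pvBlockRecord switch ([l] ++ (pvBlk [] ls).headD []) =
            ((pvBlk [] ls).headD []).foldl pvParseKV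
              ((PySem.Dict.empty.insert "Switch" switch).insert "uPort" (pvCleanUPort l)) := by
          simp [pvBlockRecord]
        rw [hrec, ← ih ((PySem.Dict.empty.insert "Switch" switch).insert "uPort" (pvCleanUPort l))]
        simp only [pvBc, List.drop_one]
        by_cases h : 2 < r.size
        · simp [List.filter, h]
        · simp [List.filter, h]
      · have hblk : pvBlk [] (l :: ls) = ([l] ++ (pvBlk [] ls).headD []) :: (pvBlk [] ls).tail := by
          rw [pvBlk_cons_kv [] l ls hl, hshift ([] ++ [l])]
          simp
        simp only [pvBc, hblk, List.headD_cons, List.drop_one, List.tail_cons,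
          List.foldl_append, List.foldl_cons, List.foldl_nil, pvProcess, if_neg hl]
        rw [← ih (pvParseKV r l)]
        simp only [pvBc, List.drop_one]

-- ===== VERDICT (by name: the statement is the Claim_ definition above) =====
theorem p_sfp_spec : Claim_equal_p_sfp := by
  intro switch lines _
  unfold Spec_p_sfp
  have hA := pvA_main switch lines [] PySem.Dict.empty
  simp only [List.nil_append] at hA
  have hB := pvB_main switch lines PySem.Dict.empty
  show p_sfp switch lines = _
  simp only [p_sfp, p_sfp_alt]
  rw [hA, ← hB]
  rfl
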